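-- pv_equiv track=rewrite | github.com/tkddls23/BaekJoon | sumi/brute_force/1062.py | solution
-- ===== SOURCE A (Python) =====
-- from itertools import combinations
--
-- def count_read_word(words,teach_word):
--     cnt = 0
--     for word in words:
--         isRead=True
--         for x in list(word):
--             if x not in teach_word:
--                 isRead = False
--                 break
--         if isRead:
--             cnt+=1
--     return cnt
--
-- def solution(k, arr):
--     st = {'a', 'n', 't', 'a', 't', 'i', 'c', 'a'}
--     remain_alphabet = set(chr(i) for i in range(97, 123)) - st
--
--     if k < len(st):
--         return 0
--     cnt = 0
--     for teach_words in list(combinations(remain_alphabet, k-len(st))):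
--         teach_word = st.union(teach_words)
--         cnt = max(cnt, count_read_word(arr,teach_word))
--
--     return cnt
-- ===== SOURCE B (Python) =====
-- from itertools import combinations
--
-- def _charbit(c):
--     o = ord(c)
--     return 1 << (o - 97) if 97 <= o <= 122 else 1 << 26
--
-- def solution(k, arr):
--     if k < 5:
--         return 0
--     base = "antic"
--     remain = [c for c in "abcdefghijklmnopqrstuvwxyz" if c not in base]
--     masks = []
--     for w in arr:
--         m = 0
--         for c in w:
--             m |= _charbit(c)
--         masks.append(m)
--     base_mask = 0
--     for c in base:
--         base_mask |= _charbit(c)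
--     best = 0
--     for comb in combinations(remain, k - 5):
--         allowed = base_mask
--         for c in comb:
--             allowed |= _charbit(c)
--         cnt = 0
--         for m in masks:
--             if m & allowed == m:
--                 cnt += 1
--         best = max(best, cnt)
--     return best
-- ===== Notes on version B (the rewrite author's own statement) =====
-- stated objective: alternative
-- what changed: B precomputes a 27-bit letter bitmask per word once and tests readability of a word under each taught-letter combination with a single AND, instead of A's per-combination set union and character-by-character membership scan of every word.
import Mathlib
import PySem

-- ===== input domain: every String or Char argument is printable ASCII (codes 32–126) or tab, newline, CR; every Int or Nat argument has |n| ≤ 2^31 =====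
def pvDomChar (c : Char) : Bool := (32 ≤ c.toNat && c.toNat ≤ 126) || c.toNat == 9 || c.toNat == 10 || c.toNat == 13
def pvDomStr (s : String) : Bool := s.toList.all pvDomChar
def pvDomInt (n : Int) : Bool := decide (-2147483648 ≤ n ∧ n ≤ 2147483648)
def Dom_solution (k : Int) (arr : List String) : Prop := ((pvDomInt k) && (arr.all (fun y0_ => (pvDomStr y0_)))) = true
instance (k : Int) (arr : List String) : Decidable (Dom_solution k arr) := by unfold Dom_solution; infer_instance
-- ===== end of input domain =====

-- B replaces A's per-combination character-membership scans by per-word letter bitmasks tested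
-- with a single AND per word (objective: alternative algorithm, same asymptotic cost).


-- ===== PORT A =====
-- list(itertools.combinations(xs, r)) exactly as CPython computes it: CPython's combinations
-- short-circuits to the empty iterator when r > len(xs); value equal to PySem.List.combinations
-- (theorem combos_eq below), but evaluable for huge r. Used by both ports (both call itertools).
def combos {α : Type} (xs : List α) (r : Nat) : List (List α) :=
  if xs.length < r then [] else PySem.List.combinations xs r

-- inner 'for x in list(word): if x not in teach_word: isRead=False; break'
def readLoop (teach : PySem.Set Char) : List Char → Bool
  | [] => true
  | c :: cs => if PySem.Set.contains teach c then readLoop teach cs else false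

def count_read_word (words : List String) (teach : PySem.Set Char) : Int :=
  words.foldl (fun cnt w => if readLoop teach w.toList then cnt + 1 else cnt) 0

-- st = {'a','n','t','a','t','i','c','a'}
def stA : PySem.Set Char := PySem.Set.ofList ['a', 'n', 't', 'a', 't', 'i', 'c', 'a']

-- remain_alphabet = set(chr(i) for i in range(97,123)) - st
def remainA : PySem.Set Char :=
  PySem.Set.diff
    (PySem.Set.ofList ((PySem.List.pyRange 97 123 1).map (fun i => Char.ofNat i.toNat))) stA

def solution (k : Int) (arr : List String) : Int :=
  if k < PySem.Set.len stA then 0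
  else
    (combos remainA (k - PySem.Set.len stA).toNat).foldl
      (fun cnt comb => max cnt (count_read_word arr (PySem.Set.union stA comb))) 0

-- ===== PORT B =====
def charbit (c : Char) : Nat :=
  if 97 ≤ c.toNat ∧ c.toNat ≤ 122 then 1 <<< (c.toNat - 97) else 1 <<< 26

def maskOf (cs : List Char) : Nat := cs.foldl (fun m c => m ||| charbit c) 0

def baseB : List Char := "antic".toList

def remainB : List Char :=
  "abcdefghijklmnopqrstuvwxyz".toList.filter (fun c => !(baseB.contains c))

def baseMaskB : Nat := baseB.foldl (fun m c => m ||| charbit c) 0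

def solution_alt (k : Int) (arr : List String) : Int :=
  if k < 5 then 0
  else
    let masks := arr.map (fun w => maskOf w.toList)
    (combos remainB (k - 5).toNat).foldl
      (fun best comb =>
        let allowed := comb.foldl (fun m c => m ||| charbit c) baseMaskB
        max best (masks.foldl (fun cnt m => if m &&& allowed == m then cnt + 1 else cnt) (0 : Int)))
      0

-- ===== PRECONDITION & SPEC =====
def Spec_solution (k : Int) (arr : List String) (out : Int) : Prop := out = solution_alt k arr
instance (k : Int) (arr : List String) (out : Int) : Decidable (Spec_solution k arr out) := by unfold Spec_solution; infer_instance

-- ===== CLAIM (what is proved, stated in full; the proofs are below) =====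
def Claim_equal_solution : Prop := ∀ (k : Int) (arr : List String), Dom_solution k arr → Spec_solution k arr (solution k arr)

-- ===== LEMMAS AND PROOFS =====

theorem combos_eq {α : Type} (xs : List α) (r : Nat) :
    combos xs r = PySem.List.combinations xs r := by
  unfold combos
  split
  . next h => exact (PySem.List.combinations_eq_nil_of_length_lt xs h).symm
  . rfl

-- the letter index each char's bit encodes (26 = "not a lowercase letter")
def idxC (c : Char) : Nat :=
  if 97 <= c.toNat && c.toNat <= 122 then c.toNat - 97 else 26

theorem charbit_eq (c : Char) : charbit c = 2 ^ idxC c := by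
  unfold charbit idxC
  by_cases h : 97 <= c.toNat && c.toNat <= 122
  . rw [if_pos h, if_pos (by simpa using h), Nat.one_shiftLeft]
  . rw [if_neg h, if_neg (by simpa using h), Nat.one_shiftLeft]

theorem testBit_charbit (c : Char) (i : Nat) :
    (charbit c).testBit i = decide (idxC c = i) := by
  rw [charbit_eq, Nat.testBit_two_pow]

theorem testBit_ormask (l : List Char) (init : Nat) (i : Nat) :
    (l.foldl (fun m c => m ||| charbit c) init).testBit i
      = (init.testBit i || l.any (fun c => decide (idxC c = i))) := by
  induction l generalizing init with
  | nil => simp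
  | cons c cs ih =>
      simp only [List.foldl_cons, List.any_cons, ih, Nat.testBit_lor, testBit_charbit]
      by_cases h : idxC c = i <;> simp [h, Bool.or_comm]

theorem testBit_maskOf (l : List Char) (i : Nat) :
    (maskOf l).testBit i = l.any (fun c => decide (idxC c = i)) := by
  unfold maskOf; rw [testBit_ormask]; simp

theorem and_eq_self_iff (m a : Nat) :
    (m &&& a == m) = true ↔ ∀ i, m.testBit i = true → a.testBit i = true := by
  rw [beq_iff_eq]
  constructor
  . intro h i hm
    have := congrArg (fun x => x.testBit i) h
    simp only [Nat.testBit_land, hm] at this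
    simpa using this
  . intro h
    apply Nat.eq_of_testBit_eq
    intro i
    rw [Nat.testBit_land]
    cases hm : m.testBit i
    . simp
    . simp [h i hm]

theorem char_eq_of_toNat_eq {c d : Char} (h : c.toNat = d.toNat) : c = d := by
  apply Char.ext
  exact UInt32.toNat_inj.mp h

def isLowerC (c : Char) : Prop := (97 <= c.toNat && c.toNat <= 122) = true

theorem idxC_inj {c d : Char} (hc : isLowerC c) (hd : isLowerC d) (h : idxC c = idxC d) :
    c = d := by
  unfold isLowerC at hc hd
  unfold idxC at h
  rw [if_pos hc, if_pos hd] at h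
  simp only [Bool.and_eq_true, decide_eq_true_eq] at hc hd
  exact char_eq_of_toNat_eq (by omega)

theorem idxC_lt_of_lower {c : Char} (hc : isLowerC c) : idxC c < 26 := by
  unfold isLowerC at hc
  unfold idxC
  rw [if_pos hc]
  simp only [Bool.and_eq_true, decide_eq_true_eq] at hc
  omega

theorem idxC_eq_of_not_lower {c : Char} (hc : ¬ isLowerC c) : idxC c = 26 := by
  unfold isLowerC at hc
  unfold idxC
  rw [if_neg (by simpa using hc)]

-- a char's bit is set in an OR of lowercase letters' bits iff the char is one of them
theorem key_char (teach : List Char) (hlow : ∀ d ∈ teach, isLowerC d) (c : Char) :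
    (teach.any fun d => decide (idxC d = idxC c)) = true ↔ c ∈ teach := by
  constructor
  . intro h
    rcases List.any_eq_true.mp h with ⟨d, hd, hdi⟩
    rw [decide_eq_true_eq] at hdi
    by_cases hc : isLowerC c
    . exact (idxC_inj (hlow d hd) hc hdi) ▸ hd
    . exfalso
      have := idxC_lt_of_lower (hlow d hd)
      rw [idxC_eq_of_not_lower hc] at hdi
      omega
  . intro h
    exact List.any_eq_true.mpr ⟨c, h, by simp⟩

theorem remain_eq : remainA = remainB := by decide

theorem stA_len : PySem.Set.len stA = 5 := by decide

theorem stA_eq : stA = ['a', 'n', 't', 'i', 'c'] := by decide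

theorem baseB_eq : baseB = ['a', 'n', 't', 'i', 'c'] := by decide

theorem remainB_lower : ∀ c ∈ remainB, isLowerC c := by
  have h : remainB.all (fun c => 97 <= c.toNat && c.toNat <= 122) = true := by decide
  intro c hc
  exact List.all_eq_true.mp h c hc

theorem baseB_lower : ∀ c ∈ baseB, isLowerC c := by
  have h : baseB.all (fun c => 97 <= c.toNat && c.toNat <= 122) = true := by decide
  intro c hc
  exact List.all_eq_true.mp h c hc

-- the allowed mask of one combination
def allowedOf (comb : List Char) : Nat :=
  comb.foldl (fun m c => m ||| charbit c) baseMaskB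

theorem testBit_allowedOf (comb : List Char) (i : Nat) :
    (allowedOf comb).testBit i = (baseB ++ comb).any (fun c => decide (idxC c = i)) := by
  unfold allowedOf baseMaskB
  rw [testBit_ormask, testBit_ormask]
  simp [List.any_append]

theorem mem_union_iff (comb : List Char) (c : Char) :
    PySem.Set.contains (PySem.Set.union stA comb) c = true ↔ c ∈ baseB ++ comb := by
  rw [PySem.Set.contains_iff, PySem.Set.mem_union, List.mem_append, stA_eq, baseB_eq]

theorem readLoop_eq_all (teach : PySem.Set Char) (l : List Char) :
    readLoop teach l = l.all (fun c => PySem.Set.contains teach c) := by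
  induction l with
  | nil => rfl
  | cons c cs ih =>
      unfold readLoop
      cases h : PySem.Set.contains teach c
      . rw [if_neg (by simp), List.all_cons, h, Bool.false_and]
      . rw [if_pos rfl, List.all_cons, h, Bool.true_and, ih]

-- per word: A's membership scan equals B's single AND test
theorem word_iff (comb : List Char) (hc : ∀ c ∈ comb, c ∈ remainB) (l : List Char) :
    readLoop (PySem.Set.union stA comb) l = (maskOf l &&& allowedOf comb == maskOf l) := by
  have hlow : ∀ d ∈ baseB ++ comb, isLowerC d := by
    intro d hd
    rcases List.mem_append.mp hd with h | h
    . exact baseB_lower d h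
    . exact remainB_lower d (hc d h)
  rw [readLoop_eq_all]
  rw [Bool.eq_iff_iff, List.all_eq_true, and_eq_self_iff]
  constructor
  . intro hall i hm
    rw [testBit_maskOf] at hm
    rcases List.any_eq_true.mp hm with ⟨c, hcl, hci⟩
    rw [decide_eq_true_eq] at hci
    rw [testBit_allowedOf, ← hci]
    exact (key_char (baseB ++ comb) hlow c).mpr ((mem_union_iff comb c).mp (hall c hcl))
  . intro hsub c hcl
    rw [mem_union_iff]
    apply (key_char (baseB ++ comb) hlow c).mp
    rw [← testBit_allowedOf]
    apply hsub
    rw [testBit_maskOf]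
    exact List.any_eq_true.mpr ⟨c, hcl, by simp⟩

-- per combination: A's counting loop equals B's masked counting loop
theorem comb_count (arr : List String) (comb : List Char) (hc : ∀ c ∈ comb, c ∈ remainB) :
    count_read_word arr (PySem.Set.union stA comb)
      = (arr.map (fun w => maskOf w.toList)).foldl
          (fun cnt m => if m &&& allowedOf comb == m then cnt + 1 else cnt) (0 : Int) := by
  unfold count_read_word
  rw [PySem.List.foldl_count_if, PySem.List.foldl_count_if, List.countP_map]
  rw [zero_add, zero_add, Nat.cast_inj]
  apply List.countP_congr
  intro w _
  rw [Function.comp_apply, word_iff comb hc]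

-- ===== VERDICT (by name: the statement is the Claim_ definition above) =====
theorem solution_spec : Claim_equal_solution := by
  unfold Claim_equal_solution
  intro k arr _
  unfold Spec_solution solution solution_alt
  rw [stA_len, remain_eq]
  by_cases hk : k < 5
  . simp [hk]
  . rw [if_neg hk, if_neg hk]
    apply PySem.List.foldl_congr_mem'
    intro comb hcomb best
    rw [combos_eq] at hcomb
    congr 1
    have hc : ∀ c ∈ comb, c ∈ remainB :=
      fun c hcm => (PySem.List.sublist_of_mem_combinations hcomb).mem hcm
    exact comb_count arr comb hc
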